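-- pv_equiv track=rewrite | github.com/Harimamy/kontiki_managing_csv | SoloLearn.py | group_by_values
-- ===== SOURCE A (Python) =====
-- def group_by_values(dictionary):
--     output = {}
--     for keys, values in dictionary.items():
--         if values in output.keys():
--             output[values].append(keys)
--         else:
--             output[values] = [keys]
--     return output
-- ===== SOURCE B (Python) =====
-- def group_by_values(dictionary):
--     uniques = []
--     for value in dictionary.values():
--         if value not in uniques:
--             uniques.append(value)
--     return {v: [k for k, w in dictionary.items() if w == v] for v in uniques}
-- ===== Notes on version B (the rewrite author's own statement) =====
-- stated objective: alternative
-- what changed: A builds the grouping in a single pass over the items, appending each key into a dict entry keyed by its value; B first collects the distinct values in first-appearance order in one pass, then builds each group by filtering the items for that value.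
import Mathlib
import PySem

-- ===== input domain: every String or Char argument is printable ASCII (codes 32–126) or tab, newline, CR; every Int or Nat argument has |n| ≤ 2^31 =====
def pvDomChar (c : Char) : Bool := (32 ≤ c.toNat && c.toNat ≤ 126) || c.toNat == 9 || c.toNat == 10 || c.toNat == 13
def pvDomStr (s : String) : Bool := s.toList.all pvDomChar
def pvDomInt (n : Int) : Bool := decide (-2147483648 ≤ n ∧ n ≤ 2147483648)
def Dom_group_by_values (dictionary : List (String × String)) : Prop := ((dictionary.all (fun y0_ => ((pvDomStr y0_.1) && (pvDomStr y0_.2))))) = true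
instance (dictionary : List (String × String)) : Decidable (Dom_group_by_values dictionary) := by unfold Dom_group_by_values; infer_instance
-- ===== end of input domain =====

-- B replaces A's single guarded dict-building pass by a unique-values collection followed by
-- a per-value filter of the items (objective: alternative decomposition, same result).

-- ===== PORT A =====
-- single pass: for each (key, value), append key to output[value] or start a new group
def group_by_values (dictionary : List (String × String)) : List (String × List String) :=
  (dictionary.foldl
    (fun output p =>
      if output.contains p.2 then
        output.modify p.2 [] (fun l => l ++ [p.1])
      else
        output.insert p.2 [p.1])
    (PySem.Dict.empty : PySem.Dict String (List String))).items

-- ===== PORT B =====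
-- first pass: distinct values in first-appearance order; then one filter pass per value
def group_by_values_alt (dictionary : List (String × String)) : List (String × List String) :=
  let uniques : List String :=
    dictionary.foldl (fun acc p => if p.2 ∈ acc then acc else acc ++ [p.2]) []
  uniques.map (fun v => (v, (dictionary.filter (fun p => p.2 == v)).map (·.1)))

-- ===== PRECONDITION & SPEC =====
def Spec_group_by_values (dictionary : List (String × String)) (out : List (String × List String)) : Prop := out = group_by_values_alt dictionary
instance (dictionary : List (String × String)) (out : List (String × List String)) : Decidable (Spec_group_by_values dictionary out) := by unfold Spec_group_by_values; infer_instance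

-- ===== CLAIM (what is proved, stated in full; the proofs are below) =====
def Claim_equal_group_by_values : Prop := ∀ (dictionary : List (String × String)), Dom_group_by_values dictionary → Spec_group_by_values dictionary (group_by_values dictionary)

-- ===== LEMMAS AND PROOFS =====

-- the body of A's loop, named for the lemmas below
def gvStep (output : PySem.Dict String (List String)) (p : String × String) :
    PySem.Dict String (List String) :=
  if output.contains p.2 then output.modify p.2 [] (fun l => l ++ [p.1])
  else output.insert p.2 [p.1]

theorem group_by_values_eq_foldl (dictionary : List (String × String)) :
    group_by_values dictionary = (dictionary.foldl gvStep PySem.Dict.empty).items := rfl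

-- the group stored at v after A's loop is the keys of the items whose value is v
theorem gvStep_getD (l : List (String × String)) :
    ∀ (d : PySem.Dict String (List String)) (v : String),
      (l.foldl gvStep d).getD v [] =
        d.getD v [] ++ (l.filter (fun p => p.2 == v)).map (·.1) := by
  induction l with
  | nil => intro d v; simp
  | cons p l ih =>
      intro d v
      simp only [List.foldl_cons, ih]
      by_cases hv : p.2 = v
      · subst hv
        by_cases hc : d.contains p.2
        · simp [gvStep, hc]
        · simp only [Bool.not_eq_true] at hc
          simp [gvStep, hc, PySem.Dict.getD_of_not_contains d [] hc]
      · have hbeq : (p.2 == v) = false := by simp [hv]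
        by_cases hc : d.contains p.2
        · simp [gvStep, hc, PySem.Dict.getD_modify, Ne.symm hv, hbeq]
        · simp only [Bool.not_eq_true] at hc
          simp [gvStep, hc, PySem.Dict.getD_insert, Ne.symm hv, hbeq]

-- the keys after A's loop are B's unique values (same fold over the values)
theorem gvStep_keys (l : List (String × String)) :
    ∀ (d : PySem.Dict String (List String)),
      (l.foldl gvStep d).keys =
        l.foldl (fun acc p => if p.2 ∈ acc then acc else acc ++ [p.2]) d.keys := by
  induction l with
  | nil => intro d; simp
  | cons p l ih =>
      intro d
      simp only [List.foldl_cons, ih]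
      by_cases hc : d.contains p.2
      · have hmem : p.2 ∈ d.keys := (PySem.Dict.contains_iff_mem_keys d p.2).mp hc
        have : (gvStep d p).keys = d.keys := by
          simp [gvStep, hc, PySem.Dict.keys_modify, PySem.Dict.keys_insert_of_contains _ _ hc]
        rw [this, if_pos hmem]
      · simp only [Bool.not_eq_true] at hc
        have hmem : p.2 ∉ d.keys := by
          intro h
          exact absurd ((PySem.Dict.contains_iff_mem_keys d p.2).mpr h) (by simp [hc])
        have : (gvStep d p).keys = d.keys ++ [p.2] := by
          simp [gvStep, hc, PySem.Dict.keys_insert_of_not_contains _ _ hc]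
        rw [this, if_neg hmem]

-- the unique-values fold keeps the accumulator duplicate-free
theorem uniq_nodup (l : List (String × String)) :
    ∀ (acc : List String), acc.Nodup →
      (l.foldl (fun acc p => if p.2 ∈ acc then acc else acc ++ [p.2]) acc).Nodup := by
  induction l with
  | nil => intro acc h; simpa using h
  | cons p l ih =>
      intro acc h
      simp only [List.foldl_cons]
      by_cases hm : p.2 ∈ acc
      · rw [if_pos hm]; exact ih acc h
      · rw [if_neg hm]
        refine ih _ ?_
        rw [List.nodup_append]
        refine ⟨h, List.nodup_singleton _, ?_⟩
        intro a ha b hb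
        have hb' : b = p.2 := by simpa using hb
        intro he
        exact hm (hb' ▸ he ▸ ha)

-- ===== VERDICT (by name: the statement is the Claim_ definition above) =====
theorem group_by_values_spec : Claim_equal_group_by_values := by
  intro dictionary _
  unfold Spec_group_by_values group_by_values_alt
  rw [group_by_values_eq_foldl]
  have hkeys := gvStep_keys dictionary PySem.Dict.empty
  simp only [PySem.Dict.keys_empty] at hkeys
  have hnd : (dictionary.foldl gvStep PySem.Dict.empty).keys.Nodup := by
    rw [hkeys]; exact uniq_nodup dictionary [] List.nodup_nil
  rw [PySem.Dict.items_eq_map_keys _ hnd []]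
  rw [hkeys]
  refine List.map_congr_left ?_
  intro v _
  have := gvStep_getD dictionary PySem.Dict.empty v
  simp only [PySem.Dict.getD_empty, List.nil_append] at this
  simp [this]
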